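-- pv_equiv track=rewrite | github.com/jonathonreilly/toy-physics | scripts/frontier_s3_cap_uniqueness.py | link_is_disk
-- ===== SOURCE A (Python) =====
-- from collections import defaultdict
--
-- def link_is_disk(dirs, edges, tris) -> bool:
--     """Check link is PL 2-disk: chi=1, has boundary edges (count=1)."""
--     V, E, F = len(dirs), len(edges), len(tris)
--     if V - E + F != 1:
--         return False
--     ec = defaultdict(int)
--     for tri in tris:
--         for pair in [(tri[0], tri[1]), (tri[0], tri[2]), (tri[1], tri[2])]:
--             ec[pair] += 1
--     has_bd = any(c == 1 for c in ec.values())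
--     all_valid = all(1 <= c <= 2 for c in ec.values())
--     return has_bd and all_valid
-- ===== SOURCE B (Python) =====
-- def link_is_disk(dirs, edges, tris) -> bool:
--     """Check link is PL 2-disk: chi=1, has boundary edges (count=1)."""
--     if len(dirs) - len(edges) + len(tris) != 1:
--         return False
--     pairs = sorted(p for t in tris
--                    for p in ((t[0], t[1]), (t[0], t[2]), (t[1], t[2])))
--     has_bd = False
--     while pairs:
--         p = pairs[0]
--         run = 1
--         while run < len(pairs) and pairs[run] == p:
--             run += 1
--         if run > 2:
--             return False
--         if run == 1:
--             has_bd = True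
--         pairs = pairs[run:]
--     return has_bd
-- ===== Notes on version B (the rewrite author's own statement) =====
-- stated objective: alternative
-- what changed: Replaces A's defaultdict edge counter and its two passes over the count values with sort-then-scan: sort the flattened ordered edge pairs lexicographically and walk the runs of equal pairs once, failing early on a run longer than 2 and recording runs of length 1 as boundary edges.
import Mathlib
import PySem

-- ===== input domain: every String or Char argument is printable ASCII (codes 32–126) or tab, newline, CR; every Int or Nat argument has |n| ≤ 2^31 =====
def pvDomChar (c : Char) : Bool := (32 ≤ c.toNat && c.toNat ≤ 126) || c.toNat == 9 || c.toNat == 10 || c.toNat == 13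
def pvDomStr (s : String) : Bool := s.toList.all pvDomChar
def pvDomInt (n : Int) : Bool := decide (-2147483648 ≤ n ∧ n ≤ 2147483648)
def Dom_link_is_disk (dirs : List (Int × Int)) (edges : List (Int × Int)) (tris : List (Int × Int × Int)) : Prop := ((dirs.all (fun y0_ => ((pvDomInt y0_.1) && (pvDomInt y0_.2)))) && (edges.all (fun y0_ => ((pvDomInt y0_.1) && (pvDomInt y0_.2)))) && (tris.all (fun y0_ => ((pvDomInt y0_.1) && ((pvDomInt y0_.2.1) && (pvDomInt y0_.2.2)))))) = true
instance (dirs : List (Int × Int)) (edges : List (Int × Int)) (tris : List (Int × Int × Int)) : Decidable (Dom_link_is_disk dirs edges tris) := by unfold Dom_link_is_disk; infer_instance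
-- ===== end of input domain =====

-- B replaces A's edge-count dictionary and its two value passes by sort-then-scan: sort all ordered
-- triangle edge pairs and walk the runs of equal pairs once, failing early on a run longer than 2
-- (alternative algorithm, no counter dictionary).

-- ===== PORT A =====
-- the three ordered edge pairs of a triangle (A's inner literal list; B flattens the same pairs)
def pvTriPairs (t : Int × Int × Int) : List (Int × Int) := [(t.1, t.2.1), (t.1, t.2.2), (t.2.1, t.2.2)]

def link_is_disk (dirs : List (Int × Int)) (edges : List (Int × Int)) (tris : List (Int × Int × Int)) : Bool :=
  let V : Int := dirs.length
  let E : Int := edges.length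
  let F : Int := tris.length
  if V - E + F ≠ 1 then false
  else
    -- ec = defaultdict(int); ec[pair] += 1
    let ec : PySem.Dict (Int × Int) Int :=
      tris.foldl (fun d tri => (pvTriPairs tri).foldl (fun d p => d.modify p 0 (· + 1)) d) PySem.Dict.empty
    let has_bd := ec.values.any (fun c => c == 1)
    let all_valid := ec.values.all (fun c => decide (1 ≤ c ∧ c ≤ 2))
    has_bd && all_valid

-- ===== PORT B =====
-- B's outer while loop: measure the run of the first pair (the inner while = 1 + takeWhile length),
-- fail on a run over 2, record a run of 1, and continue on the remaining suffix (pairs = pairs[run:]).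
def pvRunScan : List (Int × Int) → Bool → Bool
  | [], has_bd => has_bd
  | p :: rest, has_bd =>
    let run := 1 + (rest.takeWhile (fun q => q == p)).length
    if 2 < run then false
    else pvRunScan (rest.dropWhile (fun q => q == p)) (has_bd || decide (run = 1))
termination_by l _ => l.length
decreasing_by
  exact Nat.lt_succ_of_le (List.length_dropWhile_le _ _)

def link_is_disk_alt (dirs : List (Int × Int)) (edges : List (Int × Int)) (tris : List (Int × Int × Int)) : Bool :=
  if (dirs.length : Int) - edges.length + tris.length ≠ 1 then false
  else
    -- pairs = sorted(p for t in tris for p in (...)): Python sorts the tuples lexicographically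
    let pairs := PySem.List.sorted2 (tris.flatMap pvTriPairs) Prod.fst Prod.snd
    pvRunScan pairs false

-- ===== PRECONDITION & SPEC =====
def Spec_link_is_disk (dirs : List (Int × Int)) (edges : List (Int × Int)) (tris : List (Int × Int × Int)) (out : Bool) : Prop := out = link_is_disk_alt dirs edges tris
instance (dirs : List (Int × Int)) (edges : List (Int × Int)) (tris : List (Int × Int × Int)) (out : Bool) : Decidable (Spec_link_is_disk dirs edges tris out) := by unfold Spec_link_is_disk; infer_instance

-- ===== CLAIM (what is proved, stated in full; the proofs are below) =====
def Claim_equal_link_is_disk : Prop := ∀ (dirs : List (Int × Int)) (edges : List (Int × Int)) (tris : List (Int × Int × Int)), Dom_link_is_disk dirs edges tris → Spec_link_is_disk dirs edges tris (link_is_disk dirs edges tris)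

-- ===== LEMMAS AND PROOFS =====

-- sorted2 with the pair projections IS sorting by the lexicographic order on Int × Int
lemma pv_sorted2_lex (ps : List (Int × Int)) :
    PySem.List.sorted2 ps Prod.fst Prod.snd false
      = PySem.List.sorted ps (fun p => toLex p) false := by
  rw [PySem.List.sorted_eq_foldl_insertBy]
  unfold PySem.List.sorted2
  have h : (fun (a b : Int × Int) => decide (a.1 < b.1) || (!decide (b.1 < a.1) && decide (a.2 < b.2)))
      = (fun (a b : Int × Int) => decide (toLex a < toLex b)) := by
    funext a b
    rw [Bool.eq_iff_iff]
    simp only [Bool.or_eq_true, Bool.and_eq_true, Bool.not_eq_true', decide_eq_true_eq,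
      decide_eq_false_iff_not, Prod.Lex.lt_iff, ofLex_toLex]
    constructor
    · rintro (h | ⟨h1, h2⟩)
      · exact Or.inl h
      · omega
    · rintro (h | ⟨h1, h2⟩)
      · exact Or.inl h
      · right; omega
  simp only [Bool.false_eq_true, if_false, h]

-- A's counter check, characterised by counts over the flattened pair list
lemma pv_counter_char (ps : List (Int × Int)) :
    ((PySem.Dict.counter ps).values.any (fun c => c == 1) &&
     (PySem.Dict.counter ps).values.all (fun c => decide (1 ≤ c ∧ c ≤ 2)))
    = (decide (∀ p ∈ ps, ps.count p ≤ 2) && decide (∃ p ∈ ps, ps.count p = 1)) := by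
  have hval : (PySem.Dict.counter ps).values = (PySem.Set.ofList ps).map (fun k => (ps.count k : Int)) := by
    simp [PySem.Dict.values, PySem.Dict.items_counter]
  rw [Bool.eq_iff_iff]
  simp only [hval, Bool.and_eq_true, List.any_eq_true, List.all_eq_true, List.mem_map,
    beq_iff_eq, decide_eq_true_eq]
  constructor
  · rintro ⟨⟨c, ⟨k, hk, rfl⟩, hc1⟩, hall⟩
    have hkmem : k ∈ ps := (PySem.Set.mem_ofList _ _).mp hk
    refine ⟨?_, ⟨k, hkmem, by exact_mod_cast hc1⟩⟩
    intro p hp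
    have hpm : p ∈ PySem.Set.ofList ps := (PySem.Set.mem_ofList _ _).mpr hp
    have := hall _ ⟨p, hpm, rfl⟩
    omega
  · rintro ⟨hall, ⟨k, hk, hk1⟩⟩
    constructor
    · exact ⟨(ps.count k : Int), ⟨k, (PySem.Set.mem_ofList _ _).mpr hk, rfl⟩, by exact_mod_cast hk1⟩
    · rintro c ⟨p, hp, rfl⟩
      have hpm : p ∈ ps := (PySem.Set.mem_ofList _ _).mp hp
      have h2 := hall p hpm
      have hpos : 0 < ps.count p := List.count_pos_iff.mpr hpm
      constructor <;> [exact_mod_cast hpos; exact_mod_cast h2]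

-- all elements of the taken run equal the head pair
lemma pv_take_eq (p : Int × Int) (rest : List (Int × Int)) :
    ∀ x ∈ rest.takeWhile (fun q => q == p), x = p := by
  intro x hx
  simpa using List.mem_takeWhile_imp hx

-- on a lexicographically sorted list the head pair never reappears after its run
lemma pv_not_mem_drop (p : Int × Int) (rest : List (Int × Int))
    (hs : (p :: rest).Pairwise (fun a b => (toLex a : Lex (Int × Int)) ≤ toLex b)) :
    p ∉ rest.dropWhile (fun q => q == p) := by
  intro hpmem
  cases hdc : rest.dropWhile (fun q => q == p) with
  | nil => rw [hdc] at hpmem; simp at hpmem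
  | cons q qs =>
    have hq : (q == p) = false := by
      have := List.head?_dropWhile_not (fun q => q == p) rest
      rw [hdc] at this; simpa using this
    have hqp : q ≠ p := by simpa using hq
    have hqrest : q ∈ rest := by
      have := List.dropWhile_sublist (l := rest) (fun q => q == p)
      rw [hdc] at this
      exact this.subset (by simp)
    have hpq : (toLex p : Lex (Int × Int)) ≤ toLex q :=
      (List.pairwise_cons.mp hs).1 q hqrest
    have hplt : (toLex p : Lex (Int × Int)) < toLex q :=
      lt_of_le_of_ne hpq (fun h => hqp (toLex.injective h).symm)
    have hdpair : (q :: qs).Pairwise (fun a b => (toLex a : Lex (Int × Int)) ≤ toLex b) := by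
      rw [← hdc]
      exact List.Pairwise.sublist
        ((List.dropWhile_sublist _).trans (List.sublist_cons_self _ _)) hs
    rw [hdc] at hpmem
    rcases List.mem_cons.mp hpmem with h | h
    · exact hqp h.symm
    · have hqr := (List.pairwise_cons.mp hdpair).1 p h
      exact absurd (lt_of_lt_of_le hplt hqr) (lt_irrefl _)

-- the head pair's count is exactly the run length
lemma pv_count_head (p : Int × Int) (rest : List (Int × Int))
    (hs : (p :: rest).Pairwise (fun a b => (toLex a : Lex (Int × Int)) ≤ toLex b)) :
    (p :: rest).count p = 1 + (rest.takeWhile (fun q => q == p)).length := by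
  conv_lhs => rw [← List.takeWhile_append_dropWhile (p := fun q => q == p) (l := rest)]
  rw [List.count_cons, List.count_append]
  have h1 : (rest.takeWhile (fun q => q == p)).count p
      = (rest.takeWhile (fun q => q == p)).length :=
    List.count_eq_length.mpr (fun b hb => by simp [pv_take_eq p rest b hb])
  have h2 : (rest.dropWhile (fun q => q == p)).count p = 0 :=
    List.count_eq_zero.mpr (pv_not_mem_drop p rest hs)
  simp [h1, h2]
  omega

-- a pair other than the head has the same count in the dropped suffix
lemma pv_count_other (p : Int × Int) (rest : List (Int × Int)) (r : Int × Int) (hr : r ≠ p) :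
    (p :: rest).count r = (rest.dropWhile (fun q => q == p)).count r := by
  conv_lhs => rw [← List.takeWhile_append_dropWhile (p := fun q => q == p) (l := rest)]
  rw [List.count_cons, List.count_append]
  have h1 : (rest.takeWhile (fun q => q == p)).count r = 0 :=
    List.count_eq_zero.mpr (fun hm => hr (pv_take_eq p rest r hm))
  simp [h1, Ne.symm hr]

-- membership in the list = being the head pair or lying in the dropped suffix
lemma pv_mem_split (p : Int × Int) (rest : List (Int × Int)) (x : Int × Int) :
    x ∈ p :: rest ↔ x = p ∨ x ∈ rest.dropWhile (fun q => q == p) := by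
  constructor
  · intro hx
    rcases List.mem_cons.mp hx with h | h
    · exact Or.inl h
    · rw [← List.takeWhile_append_dropWhile (p := fun q => q == p) (l := rest)] at h
      rcases List.mem_append.mp h with h | h
      · exact Or.inl (pv_take_eq p rest x h)
      · exact Or.inr h
  · rintro (rfl | h)
    · simp
    · have := List.dropWhile_sublist (l := rest) (fun q => q == p)
      exact List.mem_cons_of_mem _ (this.subset h)

-- B's run scan on a lexicographically sorted list computes "all counts ≤ 2 and some count = 1"
lemma pv_runScan_char (l : List (Int × Int)) (hb : Bool)
    (hs : l.Pairwise (fun a b => (toLex a : Lex (Int × Int)) ≤ toLex b)) :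
    pvRunScan l hb
      = (decide (∀ p ∈ l, l.count p ≤ 2) && (hb || decide (∃ p ∈ l, l.count p = 1))) := by
  fun_induction pvRunScan l hb with
  | case1 hb => simp
  | case2 p rest hb run hgt =>
    have hcp := pv_count_head p rest hs
    have hnot : ¬ (∀ q ∈ p :: rest, (p :: rest).count q ≤ 2) := by
      intro h
      have := h p (by simp)
      omega
    rw [decide_eq_false hnot, Bool.false_and]
  | case3 p rest hb run hgt ih =>
    have hcp := pv_count_head p rest hs
    have hpd := pv_not_mem_drop p rest hs
    have hdsorted : (rest.dropWhile (fun q => q == p)).Pairwise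
        (fun a b => (toLex a : Lex (Int × Int)) ≤ toLex b) :=
      List.Pairwise.sublist
        ((List.dropWhile_sublist _).trans (List.sublist_cons_self _ _)) hs
    have hdne : ∀ r ∈ rest.dropWhile (fun q => q == p), r ≠ p :=
      fun r hr h => hpd (h ▸ hr)
    rw [ih hdsorted]
    rw [Bool.eq_iff_iff]
    simp only [Bool.and_eq_true, Bool.or_eq_true, decide_eq_true_eq]
    constructor
    · rintro ⟨hall, hex⟩
      refine ⟨?_, ?_⟩
      · intro x hx
        rcases (pv_mem_split p rest x).mp hx with rfl | hxd
        · rw [hcp]; omega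
        · rw [pv_count_other p rest x (hdne x hxd)]
          exact hall x hxd
      · rcases hex with (hb' | hrun1) | hex2
        · exact Or.inl hb'
        · exact Or.inr ⟨p, by simp, by rw [hcp]; simpa [run] using hrun1⟩
        · obtain ⟨r, hr, hr1⟩ := hex2
          exact Or.inr ⟨r, (pv_mem_split p rest r).mpr (Or.inr hr),
            by rw [pv_count_other p rest r (hdne r hr)]; exact hr1⟩
    · rintro ⟨hall, hex⟩
      refine ⟨?_, ?_⟩
      · intro x hx
        rw [← pv_count_other p rest x (hdne x hx)]
        exact hall x ((pv_mem_split p rest x).mpr (Or.inr hx))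
      · rcases hex with hb' | hex2
        · exact Or.inl (Or.inl hb')
        · obtain ⟨x, hx, hx1⟩ := hex2
          rcases (pv_mem_split p rest x).mp hx with rfl | hxd
          · rw [hcp] at hx1
            exact Or.inl (Or.inr (by simpa [run] using hx1))
          · exact Or.inr ⟨x, hxd, by rw [← pv_count_other p rest x (hdne x hxd)]; exact hx1⟩

-- ===== VERDICT (by name: the statement is the Claim_ definition above) =====
theorem link_is_disk_spec : Claim_equal_link_is_disk := by
  intro dirs edges tris _
  unfold Spec_link_is_disk link_is_disk link_is_disk_alt
  dsimp only
  split_ifs with h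
  · rfl
  · set ps := tris.flatMap pvTriPairs with hps
    have h1 : tris.foldl (fun d tri => (pvTriPairs tri).foldl (fun d p => d.modify p 0 (· + 1)) d) PySem.Dict.empty
        = PySem.Dict.counter ps := by
      rw [PySem.Dict.counter_eq_foldl, hps, List.foldl_flatMap]
    set s := PySem.List.sorted ps (fun p => toLex p) false with hsdef
    have hperm : s.Perm ps := PySem.List.sorted_perm ps _ false
    have h2 : PySem.List.sorted2 ps Prod.fst Prod.snd = s := pv_sorted2_lex ps
    rw [h1, h2, pv_runScan_char s false (PySem.List.sorted_pairwise ps _), pv_counter_char]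
    have hcnt : ∀ p, s.count p = ps.count p := fun p => hperm.count_eq p
    have hmem : ∀ p : Int × Int, p ∈ s ↔ p ∈ ps := fun p => hperm.mem_iff
    rw [Bool.eq_iff_iff]
    simp only [Bool.and_eq_true, Bool.or_eq_true, decide_eq_true_eq, Bool.false_eq_true,
      false_or]
    constructor
    · rintro ⟨hall, hex⟩
      refine ⟨fun p hp => hcnt p ▸ hall p ((hmem p).mp hp), ?_⟩
      obtain ⟨p, hp, h1⟩ := hex
      exact ⟨p, (hmem p).mpr hp, (hcnt p) ▸ h1⟩
    · rintro ⟨hall, hex⟩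
      refine ⟨fun p hp => (hcnt p) ▸ hall p ((hmem p).mpr hp), ?_⟩
      obtain ⟨p, hp, h1⟩ := hex
      exact ⟨p, (hmem p).mp hp, (hcnt p).symm ▸ h1⟩
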